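-- pv_equiv track=rewrite | github.com/Ken1g/InterviewBit | Tasks/Din_Prog/sub_matrices_with_sum_zero.py | solve
-- ===== SOURCE A (Python) =====
-- def solve(A):
-- 	if len(A) == 0:
-- 		return 0
-- 	R = len(A)
-- 	C = len(A[0])
-- 	pre = [[0 for i in range(C)] for j in range(R)]
--
--
-- 	for i in range(R):
-- 		for j in range(C):
-- 			if (i - 1) >= 0 and (j - 1) >= 0:
-- 				pre[i][j] = A[i][j] + pre[i - 1][j] + pre[i][j - 1] - pre[i - 1][j - 1]
-- 			elif (i - 1) >= 0 and (j - 1) < 0: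
-- 				pre[i][j] = A[i][j] + pre[i - 1][j]
-- 			elif (j - 1) >= 0 and (i - 1) < 0:
-- 				pre[i][j] = A[i][j] + pre[i][j - 1]
-- 			else:
-- 				pre[i][j] = A[i][j]
-- 	ans = 0
-- 	for r1 in range(R):
-- 		for r2 in range(r1, R):
-- 			arr = [0 for i in range(C)]
-- 			for i in range(C):
-- 				if r1 - 1  >= 0:
-- 					arr[i] = pre[r2][i] - pre[r1 - 1][i]
-- 				else:
-- 					arr[i] = pre[r2][i]
-- 			table = {}
-- 			for el in arr:
-- 				pretend = table.get(el, None)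
-- 				if pretend == None:
-- 					table[el] = 1
-- 					if el == 0:
-- 						ans += 1
-- 				else:
-- 					table[el] += 1
-- 					if el == 0:
-- 						ans += table[0]
-- 					else:
-- 						ans += (table[el] - 1)
--
--
--
--
--
-- 	return ans
-- ===== SOURCE B (Python) =====
-- def solve(A):
--     if not A:
--         return 0
--     R = len(A)
--     C = len(A[0])
--     ans = 0
--     for r1 in range(R):
--         colsum = [0] * C
--         for r2 in range(r1, R):
--             row = A[r2]
--             for j in range(C):
--                 colsum[j] += row[j]
--             table = {0: 1}
--             s = 0
--             for j in range(C):
--                 s += colsum[j]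
--                 cnt = table.get(s, 0)
--                 ans += cnt
--                 table[s] = cnt + 1
--     return ans
-- ===== Notes on version B (the rewrite author's own statement) =====
-- stated objective: simpler
-- what changed: B drops A's full 2D prefix-sum table and per-strip difference arrays: for each top row it maintains a running column-sum vector across bottom rows and counts zero-sum column intervals with a single left-to-right sweep using a counter seeded with {0:1}, replacing A's four-branch prefix recurrence and branchy dict bookkeeping.
import Mathlib
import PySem

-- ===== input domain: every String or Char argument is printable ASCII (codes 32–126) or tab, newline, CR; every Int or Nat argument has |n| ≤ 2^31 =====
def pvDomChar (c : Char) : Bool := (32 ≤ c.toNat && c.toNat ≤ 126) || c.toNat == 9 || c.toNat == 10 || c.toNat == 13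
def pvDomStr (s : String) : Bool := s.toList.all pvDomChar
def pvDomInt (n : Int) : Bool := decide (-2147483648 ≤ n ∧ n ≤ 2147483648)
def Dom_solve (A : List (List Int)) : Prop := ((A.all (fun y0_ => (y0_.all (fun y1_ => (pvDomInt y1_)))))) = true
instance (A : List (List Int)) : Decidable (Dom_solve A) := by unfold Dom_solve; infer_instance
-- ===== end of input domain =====

-- B replaces A's full 2D prefix-sum table and per-strip difference arrays by a running
-- column-sum vector per top row and a single sweep with a counter seeded with {0:1} (objective: simpler).

-- ===== PORT A =====
-- A[i][j] with in-range indices (Python list indexing; defaults never reached inside Pre_)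
def pvGet2 (m : List (List Int)) (i j : Nat) : Int := (m.getD i []).getD j 0

-- the double loop filling `pre` (rows appended in order; `row.getD (j-1) 0` is pre[i][j-1])
def pvBuildPre (A : List (List Int)) (R C : Nat) : List (List Int) :=
  (List.range R).foldl (fun pre i =>
    pre ++ [ (List.range C).foldl (fun row j =>
      row ++ [ if 1 ≤ i ∧ 1 ≤ j then
                 pvGet2 A i j + pvGet2 pre (i-1) j + row.getD (j-1) 0 - pvGet2 pre (i-1) (j-1)
               else if 1 ≤ i then pvGet2 A i j + pvGet2 pre (i-1) j
               else if 1 ≤ j then pvGet2 A i j + row.getD (j-1) 0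
               else pvGet2 A i j ] ) [] ] ) []

-- A's `table`/`ans` loop over `arr`
def pvCountA (st : PySem.Dict Int Int × Int) (arr : List Int) : PySem.Dict Int Int × Int :=
  arr.foldl (fun st el =>
    match st.1.get? el with
    | none   => (st.1.insert el 1, if el = 0 then st.2 + 1 else st.2)
    | some v =>
      let t := st.1.insert el (v + 1)
      if el = 0 then (t, st.2 + t.getD 0 0) else (t, st.2 + (t.getD el 0 - 1))) st

def solve (A : List (List Int)) : Int :=
  if A.length = 0 then 0 else
  let R := A.length
  let C := (A.headD []).length
  let pre := pvBuildPre A R C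
  (List.range R).foldl (fun ans r1 =>
    (List.range' r1 (R - r1)).foldl (fun ans r2 =>
      let arr := (List.range C).foldl (fun arr i =>
        arr ++ [ if 1 ≤ r1 then pvGet2 pre r2 i - pvGet2 pre (r1 - 1) i
                 else pvGet2 pre r2 i ]) []
      (pvCountA ((PySem.Dict.empty : PySem.Dict Int Int), ans) arr).2) ans) 0

-- ===== PORT B =====
-- one bottom row r2: add A[r2] into colsum, then sweep columns with running sum s and counter table
def pvStripStep (A : List (List Int)) (C : Nat) (st : List Int × Int) (r2 : Nat) :
    List Int × Int :=
  let row := A.getD r2 []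
  let colsum := (List.range C).foldl (fun cs j => cs.set j (cs.getD j 0 + row.getD j 0)) st.1
  let inner := (List.range C).foldl (fun (st2 : Int × PySem.Dict Int Int × Int) j =>
      let s := st2.1 + colsum.getD j 0
      let cnt := st2.2.1.getD s 0
      (s, st2.2.1.insert s (cnt + 1), st2.2.2 + cnt))
    ((0 : Int), ((PySem.Dict.empty).insert 0 1 : PySem.Dict Int Int), st.2)
  (colsum, inner.2.2)

def solve_alt (A : List (List Int)) : Int :=
  if A = [] then 0 else
  let R := A.length
  let C := (A.headD []).length
  (List.range R).foldl (fun ans r1 =>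
    ((List.range' r1 (R - r1)).foldl (pvStripStep A C) (List.replicate C 0, ans)).2) 0

-- ===== PRECONDITION & SPEC =====
-- Pre_ excludes ragged inputs on which A raises IndexError: rows shorter than row 0.
def Pre_solve (A : List (List Int)) : Prop := ∀ row ∈ A, (A.headD []).length ≤ row.length
instance (A : List (List Int)) : Decidable (Pre_solve A) := by unfold Pre_solve; infer_instance
def pvWitness_solve : List (List Int) := [[1, -1], [0, 0]]

def Spec_solve (A : List (List Int)) (out : Int) : Prop := out = solve_alt A
instance (A : List (List Int)) (out : Int) : Decidable (Spec_solve A out) := by unfold Spec_solve; infer_instance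

-- ===== CLAIM (what is proved, stated in full; the proofs are below) =====
def Claim_equal_solve : Prop := ∀ (A : List (List Int)), Dom_solve A → Pre_solve A → Spec_solve A (solve A)

-- ===== LEMMAS AND PROOFS =====

-- row-prefix sum  Σ_{j'≤i} A[r][j']
def pvRowPref (A : List (List Int)) (r i : Nat) : Int :=
  ∑ j ∈ Finset.range (i+1), pvGet2 A r j
-- 2D prefix sum  pre[i][j]
def pvP (A : List (List Int)) (i j : Nat) : Int :=
  ∑ r ∈ Finset.range (i+1), pvRowPref A r j
-- column sums over the strip of rows Ico r1 r2
def pvColF (A : List (List Int)) (r1 r2 j : Nat) : Int :=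
  ∑ r ∈ Finset.Ico r1 r2, pvGet2 A r j
-- strip prefix: rows r1..r2, columns 0..i
def pvQ (A : List (List Int)) (r1 r2 i : Nat) : Int :=
  ∑ r ∈ Finset.Ico r1 (r2+1), pvRowPref A r i

-- B's per-element counting step (the table was seeded with {0:1})
def pvStepB (st : PySem.Dict Int Int × Int) (el : Int) : PySem.Dict Int Int × Int :=
  (st.1.insert el (st.1.getD el 0 + 1), st.2 + st.1.getD el 0)

-- running prefix values produced by B's sweep
def pvScan (s : Int) (g : Nat → Int) : List Nat → List Int
  | [] => []
  | j :: l => (s + g j) :: pvScan (s + g j) g l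

theorem pvGet2_map (f : Nat → Nat → Int) (R C i j : Nat) (hi : i < R) (hj : j < C) :
    pvGet2 ((List.range R).map (fun i' => (List.range C).map (fun j' => f i' j'))) i j = f i j := by
  unfold pvGet2
  rw [PySem.List.getD_map_range _ _ _ _ hi, PySem.List.getD_map_range _ _ _ _ hj]

theorem pvSet_map_range (f : Nat → Int) (C i : Nat) (x : Int) (_hi : i < C) :
    ((List.range C).map f).set i x = (List.range C).map (fun j => if j = i then x else f j) := by
  apply List.ext_getElem
  · simp
  · intro n h1 h2
    simp only [List.getElem_set, List.getElem_map, List.getElem_range]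
    split <;> simp_all [eq_comm]

theorem pvRowPref_succ (A : List (List Int)) (r j : Nat) :
    pvRowPref A r (j+1) = pvRowPref A r j + pvGet2 A r (j+1) :=
  Finset.sum_range_succ _ _

theorem pvP_succ (A : List (List Int)) (i j : Nat) :
    pvP A (i+1) j = pvP A i j + pvRowPref A (i+1) j :=
  Finset.sum_range_succ _ _

theorem pvP_zero (A : List (List Int)) (j : Nat) : pvP A 0 j = pvRowPref A 0 j := by
  simp [pvP]

theorem pvRowPref_zero (A : List (List Int)) (r : Nat) : pvRowPref A r 0 = pvGet2 A r 0 := by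
  simp [pvRowPref]

theorem pvP_00 (A : List (List Int)) : pvP A 0 0 = pvGet2 A 0 0 := by
  simp [pvP_zero, pvRowPref_zero]

theorem pvP_0j (A : List (List Int)) (j : Nat) (hj : 1 ≤ j) :
    pvP A 0 j = pvGet2 A 0 j + pvP A 0 (j - 1) := by
  cases j with
  | zero => omega
  | succ j' => simp only [pvP_zero, Nat.add_sub_cancel, pvRowPref_succ]; ring

theorem pvP_i0 (A : List (List Int)) (i : Nat) (hi : 1 ≤ i) :
    pvP A i 0 = pvGet2 A i 0 + pvP A (i - 1) 0 := by
  cases i with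
  | zero => omega
  | succ i' => simp only [Nat.add_sub_cancel, pvP_succ, pvRowPref_zero]; ring

theorem pvP_ij (A : List (List Int)) (i j : Nat) (hi : 1 ≤ i) (hj : 1 ≤ j) :
    pvP A i j = pvGet2 A i j + pvP A (i - 1) j + pvP A i (j - 1) - pvP A (i - 1) (j - 1) := by
  cases i with
  | zero => omega
  | succ i' =>
    cases j with
    | zero => omega
    | succ j' =>
      have h1 := pvP_succ A i' (j' + 1)
      have h2 := pvRowPref_succ A (i' + 1) j'
      have h3 := pvP_succ A i' j'
      simp only [Nat.add_sub_cancel]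
      linarith

-- the inner row loop of pvBuildPre builds the pvP row
theorem pvBuildRow (A : List (List Int)) (C i : Nat) :
    ∀ (len j0 : Nat), j0 + len = C →
    (List.range' j0 len).foldl (fun row j =>
      row ++ [ if 1 ≤ i ∧ 1 ≤ j then
                 pvGet2 A i j
                   + pvGet2 ((List.range i).map (fun i' => (List.range C).map (fun j' => pvP A i' j'))) (i-1) j
                   + row.getD (j-1) 0
                   - pvGet2 ((List.range i).map (fun i' => (List.range C).map (fun j' => pvP A i' j'))) (i-1) (j-1)
               else if 1 ≤ i then
                 pvGet2 A i j
                   + pvGet2 ((List.range i).map (fun i' => (List.range C).map (fun j' => pvP A i' j'))) (i-1) j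
               else if 1 ≤ j then pvGet2 A i j + row.getD (j-1) 0
               else pvGet2 A i j ])
      ((List.range j0).map (fun j => pvP A i j))
    = (List.range C).map (fun j => pvP A i j) := by
  intro len
  induction len with
  | zero => intro j0 h; simp only [List.range', List.foldl_nil]; rw [show j0 = C by omega]
  | succ n ih =>
    intro j0 h
    rw [List.range'_succ, List.foldl_cons]
    have hj0 : j0 < C := by omega
    have hrow : ((List.range j0).map (fun j => pvP A i j)).getD (j0 - 1) 0
        = if 1 ≤ j0 then pvP A i (j0 - 1) else 0 := by
      split
      · exact PySem.List.getD_map_range _ _ _ _ (by omega)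
      · have : j0 = 0 := by omega
        simp [this]
    have hcell :
        (if 1 ≤ i ∧ 1 ≤ j0 then
           pvGet2 A i j0
             + pvGet2 ((List.range i).map (fun i' => (List.range C).map (fun j' => pvP A i' j'))) (i-1) j0
             + ((List.range j0).map (fun j => pvP A i j)).getD (j0-1) 0
             - pvGet2 ((List.range i).map (fun i' => (List.range C).map (fun j' => pvP A i' j'))) (i-1) (j0-1)
         else if 1 ≤ i then
           pvGet2 A i j0
             + pvGet2 ((List.range i).map (fun i' => (List.range C).map (fun j' => pvP A i' j'))) (i-1) j0
         else if 1 ≤ j0 then pvGet2 A i j0 + ((List.range j0).map (fun j => pvP A i j)).getD (j0-1) 0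
         else pvGet2 A i j0) = pvP A i j0 := by
      rw [hrow]
      rcases Nat.lt_or_ge i 1 with hi1 | hi1 <;> rcases Nat.lt_or_ge j0 1 with hj1 | hj1
      · -- i = 0, j0 = 0
        rw [if_neg (by omega : ¬ (1 ≤ i ∧ 1 ≤ j0)), if_neg (by omega : ¬ 1 ≤ i),
          if_neg (by omega : ¬ 1 ≤ j0)]
        have hi0 : i = 0 := by omega
        have hj00 : j0 = 0 := by omega
        subst hi0; subst hj00
        exact (pvP_00 A).symm
      · -- i = 0, j0 ≥ 1
        rw [if_neg (by omega : ¬ (1 ≤ i ∧ 1 ≤ j0)), if_neg (by omega : ¬ 1 ≤ i),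
          if_pos hj1, if_pos hj1]
        have hi0 : i = 0 := by omega
        subst hi0
        rw [pvP_0j A j0 hj1]
      · -- i ≥ 1, j0 = 0
        rw [if_neg (by omega : ¬ (1 ≤ i ∧ 1 ≤ j0)), if_pos hi1,
          pvGet2_map _ _ _ _ _ (by omega) hj0]
        have hj00 : j0 = 0 := by omega
        subst hj00
        rw [pvP_i0 A i hi1]
      · -- i ≥ 1, j0 ≥ 1
        rw [if_pos (⟨hi1, hj1⟩ : 1 ≤ i ∧ 1 ≤ j0), if_pos hj1,
          pvGet2_map _ _ _ _ _ (by omega) hj0, pvGet2_map _ _ _ _ _ (by omega) (by omega),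
          pvP_ij A i j0 hi1 hj1]
    rw [hcell]
    have : (List.range j0).map (fun j => pvP A i j) ++ [pvP A i j0]
        = (List.range (j0+1)).map (fun j => pvP A i j) := by
      rw [List.range_succ, List.map_append]; rfl
    rw [this]
    exact ih (j0 + 1) (by omega)

theorem pvBuildPre_eq (A : List (List Int)) (C : Nat) :
    ∀ R, pvBuildPre A R C
      = (List.range R).map (fun i => (List.range C).map (fun j => pvP A i j)) := by
  intro R
  induction R with
  | zero => rfl
  | succ R ih =>
    unfold pvBuildPre at *
    rw [List.range_succ, List.foldl_append, ih, List.foldl_cons, List.foldl_nil,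
      List.map_append]
    congr 1
    have h2 := pvBuildRow A C R C 0 (by omega)
    rw [← List.range_eq_range'] at h2
    simp only [List.range_zero, List.map_nil] at h2
    simp only [List.map_cons, List.map_nil]
    rw [h2]

-- B's column-sum update loop, on a closed-form colsum
theorem pvColsumAux (C : Nat) (g : Nat → Int) (row : List Int) :
    ∀ (len j0 : Nat), j0 + len = C →
    (List.range' j0 len).foldl (fun cs j => cs.set j (cs.getD j 0 + row.getD j 0))
        ((List.range C).map (fun j => if j < j0 then g j + row.getD j 0 else g j))
    = (List.range C).map (fun j => g j + row.getD j 0) := by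
  intro len
  induction len with
  | zero =>
    intro j0 h
    simp only [List.range', List.foldl_nil]
    apply List.map_congr_left
    intro j hj
    rw [if_pos (by rw [List.mem_range] at hj; omega)]
  | succ n ih =>
    intro j0 h
    rw [List.range'_succ, List.foldl_cons]
    have hj0 : j0 < C := by omega
    rw [PySem.List.getD_map_range _ _ _ _ hj0, if_neg (by omega),
      pvSet_map_range _ _ _ _ hj0]
    have heq : (List.range C).map (fun j => if j = j0 then g j0 + row.getD j0 0
          else if j < j0 then g j + row.getD j 0 else g j)
        = (List.range C).map (fun j => if j < j0 + 1 then g j + row.getD j 0 else g j) := by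
      apply List.map_congr_left
      intro j hj
      by_cases h1 : j = j0
      · subst h1; simp
      · rw [if_neg h1]
        by_cases h2 : j < j0
        · rw [if_pos h2, if_pos (by omega)]
        · rw [if_neg h2, if_neg (by omega)]
    rw [heq]
    exact ih (j0 + 1) (by omega)

theorem pvColsumStep (C : Nat) (g : Nat → Int) (row : List Int) :
    (List.range C).foldl (fun cs j => cs.set j (cs.getD j 0 + row.getD j 0))
        ((List.range C).map g)
    = (List.range C).map (fun j => g j + row.getD j 0) := by
  have h := pvColsumAux C g row C 0 (by omega)
  rw [← List.range_eq_range'] at h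
  simpa using h

-- B's inner sweep, split into the scan of s-values and the counting fold
theorem pvInnerScan (g : Nat → Int) :
    ∀ (l : List Nat) (s : Int) (t : PySem.Dict Int Int) (c : Int),
    (l.foldl (fun (st2 : Int × PySem.Dict Int Int × Int) j =>
        (st2.1 + g j, st2.2.1.insert (st2.1 + g j) (st2.2.1.getD (st2.1 + g j) 0 + 1),
          st2.2.2 + st2.2.1.getD (st2.1 + g j) 0)) (s, t, c)).2.2
    = ((pvScan s g l).foldl pvStepB (t, c)).2 := by
  intro l
  induction l with
  | nil => intro s t c; rfl
  | cons j l ih =>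
    intro s t c
    rw [List.foldl_cons, ih]
    rfl

theorem pvScan_range' (g : Nat → Int) :
    ∀ (len j0 : Nat),
    pvScan (∑ j' ∈ Finset.range j0, g j') g (List.range' j0 len)
    = (List.range' j0 len).map (fun j => ∑ j' ∈ Finset.range (j+1), g j') := by
  intro len
  induction len with
  | zero => intro j0; rfl
  | succ n ih =>
    intro j0
    rw [List.range'_succ]
    show ((∑ j' ∈ Finset.range j0, g j') + g j0)
        :: pvScan ((∑ j' ∈ Finset.range j0, g j') + g j0) g (List.range' (j0+1) n) = _
    rw [← Finset.sum_range_succ, ih]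
    rfl

-- A's branchy dict counting equals B's seeded-counter fold
theorem pvCount_eq :
    ∀ (L : List Int) (tA tB : PySem.Dict Int Int) (c : Int),
    (∀ k : Int, tB.getD k 0 = tA.getD k 0 + (if k = 0 then 1 else 0)) →
    (pvCountA (tA, c) L).2 = (L.foldl pvStepB (tB, c)).2 := by
  intro L
  induction L with
  | nil => intro tA tB c _; rfl
  | cons el L ih =>
    intro tA tB c hinv
    rw [show pvCountA (tA, c) (el :: L) = pvCountA
        (match tA.get? el with
         | none => (tA.insert el 1, if el = 0 then c + 1 else c)
         | some v =>
           let t := tA.insert el (v + 1)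
           if el = 0 then (t, c + t.getD 0 0) else (t, c + (t.getD el 0 - 1))) L from rfl]
    rw [List.foldl_cons]
    rcases hget : tA.get? el with _ | v
    · -- el not yet in A's table
      have hA0 : tA.getD el 0 = 0 := PySem.Dict.getD_of_get?_eq_none _ _ hget
      have hB : tB.getD el 0 = if el = 0 then 1 else 0 := by rw [hinv el, hA0]; ring
      have hans : (if el = 0 then c + 1 else c) = c + tB.getD el 0 := by
        rw [hB]; split <;> ring
      rw [hans]
      apply ih
      intro k
      show (tB.insert el (tB.getD el 0 + 1)).getD k 0 = (tA.insert el 1).getD k 0 + _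
      rw [PySem.Dict.getD_insert, PySem.Dict.getD_insert]
      by_cases hk : k = el
      · rw [if_pos hk, if_pos hk, hB]
        subst hk
        split <;> ring
      · rw [if_neg hk, if_neg hk, hinv k]
    · -- el already in A's table with count v
      have hAv : tA.getD el 0 = v := PySem.Dict.getD_of_get?_eq_some _ _ hget
      have htel : (tA.insert el (v + 1)).getD el 0 = v + 1 := by
        rw [PySem.Dict.getD_insert, if_pos rfl]
      have hans : (if el = 0 then c + (tA.insert el (v + 1)).getD 0 0
            else c + ((tA.insert el (v + 1)).getD el 0 - 1)) = c + tB.getD el 0 := by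
        rw [hinv el, hAv]
        by_cases h0 : el = 0
        · subst h0; rw [if_pos rfl, htel]; norm_num
        · rw [if_neg h0, htel, if_neg h0]; ring
      show (pvCountA (if el = 0 then (tA.insert el (v+1), c + (tA.insert el (v+1)).getD 0 0)
          else (tA.insert el (v+1), c + ((tA.insert el (v+1)).getD el 0 - 1))) L).2 = _
      have hst : (if el = 0 then (tA.insert el (v+1), c + (tA.insert el (v+1)).getD 0 0)
          else (tA.insert el (v+1), c + ((tA.insert el (v+1)).getD el 0 - 1)))
          = (tA.insert el (v+1), c + tB.getD el 0) := by
        rw [← hans]; split <;> rfl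
      rw [hst]
      apply ih
      intro k
      show (tB.insert el (tB.getD el 0 + 1)).getD k 0 = (tA.insert el (v+1)).getD k 0 + _
      rw [PySem.Dict.getD_insert, PySem.Dict.getD_insert]
      by_cases hk : k = el
      · subst hk
        rw [if_pos rfl, if_pos rfl, hinv k, hAv]
        ring
      · rw [if_neg hk, if_neg hk, hinv k]

theorem pvQ_eq_colF (A : List (List Int)) (r1 r2 i : Nat) :
    pvQ A r1 r2 i = ∑ j ∈ Finset.range (i+1), pvColF A r1 (r2+1) j := by
  unfold pvQ pvRowPref pvColF
  exact Finset.sum_comm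

theorem pvSeed_inv (k : Int) :
    ((PySem.Dict.empty : PySem.Dict Int Int).insert 0 1).getD k 0
    = (PySem.Dict.empty : PySem.Dict Int Int).getD k 0 + (if k = 0 then 1 else 0) := by
  rw [PySem.Dict.getD_insert, PySem.Dict.getD_empty]
  split <;> simp_all

theorem pvStrip_eq (A : List (List Int)) (C r1 : Nat) :
    ∀ (len r2₀ : Nat) (c : Int), r1 ≤ r2₀ →
    ((List.range' r2₀ len).foldl (pvStripStep A C)
        ((List.range C).map (fun j => pvColF A r1 r2₀ j), c)).2
    = (List.range' r2₀ len).foldl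
        (fun c r2 => (pvCountA ((PySem.Dict.empty : PySem.Dict Int Int), c)
          ((List.range C).map (fun i => pvQ A r1 r2 i))).2) c := by
  intro len
  induction len with
  | zero => intro r2₀ c _; rfl
  | succ n ih =>
    intro r2₀ c hr
    rw [List.range'_succ, List.foldl_cons, List.foldl_cons]
    have hcs : (List.range C).foldl
        (fun cs j => cs.set j (cs.getD j 0 + (A.getD r2₀ []).getD j 0))
        ((List.range C).map (fun j => pvColF A r1 r2₀ j))
        = (List.range C).map (fun j => pvColF A r1 (r2₀+1) j) := by
      rw [pvColsumStep]
      apply List.map_congr_left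
      intro j _
      show pvColF A r1 r2₀ j + (A.getD r2₀ []).getD j 0 = _
      unfold pvColF
      rw [Finset.sum_Ico_succ_top (by omega)]
      rfl
    have hstep : pvStripStep A C ((List.range C).map (fun j => pvColF A r1 r2₀ j), c) r2₀
        = ((List.range C).map (fun j => pvColF A r1 (r2₀+1) j),
           (pvCountA ((PySem.Dict.empty : PySem.Dict Int Int), c)
             ((List.range C).map (fun i => pvQ A r1 r2₀ i))).2) := by
      unfold pvStripStep
      simp only [hcs]
      refine Prod.ext rfl ?_
      show ((List.range C).foldl (fun (st2 : Int × PySem.Dict Int Int × Int) j =>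
          (st2.1 + ((List.range C).map (fun j => pvColF A r1 (r2₀+1) j)).getD j 0,
            st2.2.1.insert (st2.1 + ((List.range C).map (fun j => pvColF A r1 (r2₀+1) j)).getD j 0)
              (st2.2.1.getD (st2.1 + ((List.range C).map (fun j => pvColF A r1 (r2₀+1) j)).getD j 0) 0 + 1),
            st2.2.2 + st2.2.1.getD (st2.1 + ((List.range C).map (fun j => pvColF A r1 (r2₀+1) j)).getD j 0) 0))
          ((0 : Int), ((PySem.Dict.empty).insert 0 1 : PySem.Dict Int Int), c)).2.2 = _
      rw [pvInnerScan]
      have hscan : pvScan 0 (fun j => ((List.range C).map (fun j => pvColF A r1 (r2₀+1) j)).getD j 0)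
            (List.range C)
          = (List.range C).map (fun i => pvQ A r1 r2₀ i) := by
        have h := pvScan_range' (fun j => ((List.range C).map (fun j => pvColF A r1 (r2₀+1) j)).getD j 0) C 0
        simp only [Finset.range_zero, Finset.sum_empty] at h
        rw [← List.range_eq_range'] at h
        rw [h]
        apply List.map_congr_left
        intro i hi
        rw [List.mem_range] at hi
        rw [pvQ_eq_colF]
        apply Finset.sum_congr rfl
        intro j' hj'
        rw [Finset.mem_range] at hj'
        exact PySem.List.getD_map_range _ _ _ _ (by omega)
      rw [hscan]
      exact (pvCount_eq _ _ _ _ pvSeed_inv).symm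
    rw [hstep]
    exact ih (r2₀ + 1) _ (by omega)

-- arr's entry for strip (r1, r2) equals pvQ
theorem pvArrElt (A : List (List Int)) (R C r1 r2 i : Nat)
    (h1 : r1 ≤ r2) (h2 : r2 < R) (hi : i < C) :
    (if 1 ≤ r1 then
       pvGet2 ((List.range R).map (fun i' => (List.range C).map (fun j' => pvP A i' j'))) r2 i
         - pvGet2 ((List.range R).map (fun i' => (List.range C).map (fun j' => pvP A i' j'))) (r1-1) i
     else pvGet2 ((List.range R).map (fun i' => (List.range C).map (fun j' => pvP A i' j'))) r2 i)
    = pvQ A r1 r2 i := by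
  split_ifs with hr1
  · rw [pvGet2_map _ _ _ _ _ h2 hi, pvGet2_map _ _ _ _ _ (by omega) hi]
    unfold pvQ pvP
    rw [Finset.sum_Ico_eq_sub _ (by omega), show r1 - 1 + 1 = r1 from by omega]
  · have hr1 : r1 = 0 := by omega
    subst hr1
    rw [pvGet2_map _ _ _ _ _ h2 hi]
    unfold pvQ pvP
    rw [Finset.range_eq_Ico]

-- ===== VERDICT (by name: the statement is the Claim_ definition above) =====
theorem solve_spec : Claim_equal_solve := by
  intro A _ _
  unfold Spec_solve solve solve_alt
  by_cases hA : A = []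
  · subst hA; rfl
  · rw [if_neg (by simpa [List.length_eq_zero_iff] using hA), if_neg hA]
    simp only [pvBuildPre_eq]
    apply List.foldl_ext
    intro c r1 hr1
    rw [List.mem_range] at hr1
    have hA' : (List.range' r1 (A.length - r1)).foldl
        (fun ans r2 => (pvCountA ((PySem.Dict.empty : PySem.Dict Int Int), ans)
          ((List.range (A.headD []).length).foldl (fun arr i =>
            arr ++ [ if 1 ≤ r1 then
                       pvGet2 ((List.range A.length).map (fun i' => (List.range (A.headD []).length).map (fun j' => pvP A i' j'))) r2 i
                         - pvGet2 ((List.range A.length).map (fun i' => (List.range (A.headD []).length).map (fun j' => pvP A i' j'))) (r1 - 1) i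
                     else pvGet2 ((List.range A.length).map (fun i' => (List.range (A.headD []).length).map (fun j' => pvP A i' j'))) r2 i ]) [])).2) c
        = (List.range' r1 (A.length - r1)).foldl
            (fun c r2 => (pvCountA ((PySem.Dict.empty : PySem.Dict Int Int), c)
              ((List.range (A.headD []).length).map (fun i => pvQ A r1 r2 i))).2) c := by
      apply List.foldl_ext
      intro ans r2 hr2
      rw [List.mem_range'_1] at hr2
      rw [PySem.List.foldl_append_singleton_eq_map, List.nil_append]
      apply congrArg (fun L => (pvCountA ((PySem.Dict.empty : PySem.Dict Int Int), ans) L).2)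
      apply List.map_congr_left
      intro i hi
      rw [List.mem_range] at hi
      exact pvArrElt A A.length (A.headD []).length r1 r2 i hr2.1 (by omega) hi
    have hrep : (List.replicate (A.headD []).length (0 : Int))
        = (List.range (A.headD []).length).map (fun j => pvColF A r1 r1 j) := by
      have h0 : ∀ j ∈ List.range (A.headD []).length, pvColF A r1 r1 j = (fun _ => (0:Int)) j := by
        intro j _; simp [pvColF]
      rw [List.map_congr_left h0]
      simp
    have hB' : ((List.range' r1 (A.length - r1)).foldl (pvStripStep A (A.headD []).length)
          (List.replicate (A.headD []).length (0 : Int), c)).2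
        = (List.range' r1 (A.length - r1)).foldl
            (fun c r2 => (pvCountA ((PySem.Dict.empty : PySem.Dict Int Int), c)
              ((List.range (A.headD []).length).map (fun i => pvQ A r1 r2 i))).2) c := by
      rw [hrep]
      exact pvStrip_eq A (A.headD []).length r1 (A.length - r1) r1 c (Nat.le_refl r1)
    exact hA'.trans hB'.symm
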